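-- pv_equiv track=rewrite | github.com/haoweihuang1998/Python_code | 期末考/Q2.py | FindintAns
-- ===== SOURCE A (Python) =====
-- def FindintAns(a,b,Limit):
--     IntAnsList=[]
--     a=int(a)
--     b=int(b)
--     for x in range(Limit+1):
--         for y in range(Limit+1):
--             if a*x+b*y==0:
--                 if x>0:
--                     IntAnsList.append("["+str(x)+","+str(y)+"]")
--
--
--     return IntAnsList
-- ===== SOURCE B (Python) =====
-- def FindintAns(a, b, Limit):
--     a = int(a)
--     b = int(b)
--     out = []
--     if b == 0:
--         if a == 0:
--             for x in range(1, Limit + 1):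
--                 for y in range(Limit + 1):
--                     out.append("[" + str(x) + "," + str(y) + "]")
--         return out
--     for x in range(1, Limit + 1):
--         num = -a * x
--         if num % b == 0:
--             y = num // b
--             if 0 <= y <= Limit:
--                 out.append("[" + str(x) + "," + str(y) + "]")
--     return out
-- ===== Notes on version B (the rewrite author's own statement) =====
-- stated objective: faster
-- what changed: B drops the nested y-scan: for each x it solves b*y = -a*x directly with divisibility + floor division (with separate closed b==0 branches), instead of testing every (x,y) pair.
import Mathlib
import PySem

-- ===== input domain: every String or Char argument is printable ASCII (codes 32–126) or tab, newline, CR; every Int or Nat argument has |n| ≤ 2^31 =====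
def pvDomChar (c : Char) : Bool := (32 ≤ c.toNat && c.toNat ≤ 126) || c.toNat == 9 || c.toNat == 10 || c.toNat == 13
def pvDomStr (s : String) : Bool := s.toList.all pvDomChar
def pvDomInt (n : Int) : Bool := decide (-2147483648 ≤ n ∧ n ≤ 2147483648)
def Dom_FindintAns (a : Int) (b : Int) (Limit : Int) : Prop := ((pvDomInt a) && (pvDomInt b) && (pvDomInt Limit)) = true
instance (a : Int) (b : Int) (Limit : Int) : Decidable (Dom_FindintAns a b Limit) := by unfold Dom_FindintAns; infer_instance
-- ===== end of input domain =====

-- B replaces A's nested scan of all (x,y) pairs by directly solving b*y = -a*x per x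
-- (divisibility test + floor division, with explicit b = 0 branches); return value proved equal everywhere.

-- shared string formatting "["+str(x)+","+str(y)+"]"
def pvFmt (x y : Int) : String := "[" ++ PySem.Int.toStr x ++ "," ++ PySem.Int.toStr y ++ "]"

-- ===== PORT A =====
def FindintAns (a : Int) (b : Int) (Limit : Int) : List String :=
  (PySem.List.pyRange 0 (Limit+1) 1).foldl (fun acc x =>
    (PySem.List.pyRange 0 (Limit+1) 1).foldl (fun acc2 y =>
      if a*x + b*y = 0 then
        if 0 < x then acc2 ++ [pvFmt x y] else acc2
      else acc2) acc) []

-- ===== PORT B =====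
def FindintAns_alt (a : Int) (b : Int) (Limit : Int) : List String :=
  if b = 0 then
    if a = 0 then
      (PySem.List.pyRange 1 (Limit+1) 1).foldl (fun acc x =>
        (PySem.List.pyRange 0 (Limit+1) 1).foldl (fun acc2 y => acc2 ++ [pvFmt x y]) acc) []
    else []
  else
    (PySem.List.pyRange 1 (Limit+1) 1).foldl (fun acc x =>
      let num := -a * x
      if PySem.Int.mod num b = 0 then
        let y := PySem.Int.floordiv num b
        if 0 ≤ y ∧ y ≤ Limit then acc ++ [pvFmt x y] else acc
      else acc) []

-- ===== PRECONDITION & SPEC =====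
def Spec_FindintAns (a : Int) (b : Int) (Limit : Int) (out : List String) : Prop := out = FindintAns_alt a b Limit
instance (a : Int) (b : Int) (Limit : Int) (out : List String) : Decidable (Spec_FindintAns a b Limit out) := by unfold Spec_FindintAns; infer_instance

-- ===== CLAIM (what is proved, stated in full; the proofs are below) =====
def Claim_equal_FindintAns : Prop := ∀ (a : Int) (b : Int) (Limit : Int), Dom_FindintAns a b Limit → Spec_FindintAns a b Limit (FindintAns a b Limit)

-- ===== LEMMAS AND PROOFS =====

-- flatMap congruence on members
theorem pv_flatMap_congr {α β : Type} (l : List α) (f g : α → List β)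
    (h : ∀ x ∈ l, f x = g x) : l.flatMap f = l.flatMap g := by
  induction l with
  | nil => rfl
  | cons hd t ih =>
    simp only [List.flatMap_cons]
    rw [h hd (by simp), ih (fun x hx => h x (by simp [hx]))]

-- filtering (· = v) from a nodup list
theorem pv_filter_eq_of_nodup {α : Type} [DecidableEq α] (l : List α) (v : α)
    (hnd : l.Nodup) :
    l.filter (fun y => decide (y = v)) = if v ∈ l then [v] else [] := by
  induction l with
  | nil => simp
  | cons hd t ih =>
    rcases List.nodup_cons.mp hnd with ⟨hhd, hndt⟩
    by_cases h : hd = v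
    · subst h
      simp [ih hndt, hhd]
    · simp [h, ih hndt, Ne.symm h]

-- A as a flatMap over x ∈ [1, Limit] of the formatted y-solutions
theorem pv_A_eq (a b Limit : Int) :
    FindintAns a b Limit =
      (PySem.List.pyRange 1 (Limit+1) 1).flatMap (fun x =>
        ((PySem.List.pyRange 0 (Limit+1) 1).filter (fun y => decide (a*x + b*y = 0))).map (pvFmt x)) := by
  unfold FindintAns
  refine Eq.trans (PySem.List.foldl_congr_mem _ _
      (fun acc x => acc ++ (if 0 < x then
        ((PySem.List.pyRange 0 (Limit+1) 1).filter (fun y => decide (a*x + b*y = 0))).map (pvFmt x)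
      else [])) [] ?_) ?_
  · intro acc x _
    dsimp only
    by_cases hx : 0 < x
    · rw [if_pos hx]
      refine Eq.trans (PySem.List.foldl_congr_mem _ _
          (fun acc2 y => if (fun y => decide (a*x + b*y = 0)) y then acc2 ++ [pvFmt x y] else acc2)
          acc ?_) ?_
      · intro acc2 y _
        simp [hx]
      · exact PySem.List.foldl_append_if _ _ _ _
    · rw [if_neg hx, List.append_nil]
      refine Eq.trans (PySem.List.foldl_congr_mem _ _ (fun acc2 _ => acc2) acc ?_) ?_
      · intro acc2 y _
        simp [hx]
      · exact PySem.List.foldl_ignore _ _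
  · refine Eq.trans (PySem.List.foldl_append_eq_flatMap _ _ _) ?_
    rw [List.nil_append]
    by_cases hL : (0:Int) < Limit + 1
    · rw [PySem.List.pyRange_one_cons hL]
      simp only [List.flatMap_cons]
      rw [if_neg (by omega : ¬ (0:Int) < 0), List.nil_append]
      refine pv_flatMap_congr _ _ _ ?_
      intro x hx
      have := (PySem.List.mem_pyRange_one.mp hx).1
      rw [if_pos (by omega)]
    · rw [PySem.List.pyRange_one_eq_nil (by omega), PySem.List.pyRange_one_eq_nil (by omega)]
      rfl

-- the unique y solving a*x + b*y = 0 when b ≠ 0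
theorem pv_solve (a b x y : Int) (hb : b ≠ 0) :
    a*x + b*y = 0 ↔ (PySem.Int.mod (-a*x) b = 0 ∧ y = PySem.Int.floordiv (-a*x) b) := by
  have hkey := PySem.Int.floordiv_mul_add_mod (-a*x) b
  constructor
  · intro h
    have hby : b * y = -a * x := by linear_combination h
    have hdvd : b ∣ (-a*x) := ⟨y, hby.symm⟩
    have hmod : PySem.Int.mod (-a*x) b = 0 := (PySem.Int.mod_eq_zero_iff_dvd _ _).mpr hdvd
    refine ⟨hmod, ?_⟩
    rw [hmod] at hkey
    have hbb : b * PySem.Int.floordiv (-a*x) b = b * y := by linear_combination hkey - hby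
    exact (mul_left_cancel₀ hb hbb).symm
  · rintro ⟨hmod, hy⟩
    rw [hmod] at hkey
    subst hy
    linear_combination hkey

-- per-x agreement of A's y-scan with B's direct solution, for b ≠ 0
theorem pv_inner_eq (a b Limit x : Int) (hb : b ≠ 0) :
    ((PySem.List.pyRange 0 (Limit+1) 1).filter (fun y => decide (a*x + b*y = 0))).map (pvFmt x)
    = (if PySem.Int.mod (-a*x) b = 0 then
         if 0 ≤ PySem.Int.floordiv (-a*x) b ∧ PySem.Int.floordiv (-a*x) b ≤ Limit
         then [pvFmt x (PySem.Int.floordiv (-a*x) b)] else []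
       else []) := by
  by_cases hmod : PySem.Int.mod (-a*x) b = 0
  · rw [if_pos hmod]
    have hfc : (PySem.List.pyRange 0 (Limit+1) 1).filter (fun y => decide (a*x + b*y = 0))
        = (PySem.List.pyRange 0 (Limit+1) 1).filter (fun y => decide (y = PySem.Int.floordiv (-a*x) b)) := by
      refine List.filter_congr ?_
      intro y _
      simp only [decide_eq_decide]
      rw [pv_solve a b x y hb]
      exact ⟨fun h => h.2, fun h => ⟨hmod, h⟩⟩
    rw [hfc, pv_filter_eq_of_nodup _ _ (PySem.List.nodup_pyRange_one 0 (Limit+1))]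
    by_cases hin : PySem.Int.floordiv (-a*x) b ∈ PySem.List.pyRange 0 (Limit+1) 1
    · have := PySem.List.mem_pyRange_one.mp hin
      rw [if_pos hin, if_pos (by omega)]
      rfl
    · rw [if_neg hin, if_neg (fun hr =>
        hin (PySem.List.mem_pyRange_one.mpr ⟨hr.1, by omega⟩))]
      rfl
  · rw [if_neg hmod]
    have hnil : (PySem.List.pyRange 0 (Limit+1) 1).filter (fun y => decide (a*x + b*y = 0)) = [] := by
      refine List.filter_eq_nil_iff.mpr ?_
      intro y _
      simp only [decide_eq_true_eq]
      intro h
      exact hmod ((pv_solve a b x y hb).mp h).1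
    rw [hnil]
    rfl

-- B (b ≠ 0 branch) as a flatMap of the direct solutions
theorem pv_B_eq (a b Limit : Int) (hb : ¬ b = 0) :
    FindintAns_alt a b Limit =
      (PySem.List.pyRange 1 (Limit+1) 1).flatMap (fun x =>
        if PySem.Int.mod (-a*x) b = 0 then
          if 0 ≤ PySem.Int.floordiv (-a*x) b ∧ PySem.Int.floordiv (-a*x) b ≤ Limit
          then [pvFmt x (PySem.Int.floordiv (-a*x) b)] else []
        else []) := by
  unfold FindintAns_alt
  rw [if_neg hb]
  refine Eq.trans (PySem.List.foldl_congr_mem _ _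
      (fun acc x => acc ++ (if PySem.Int.mod (-a*x) b = 0 then
        if 0 ≤ PySem.Int.floordiv (-a*x) b ∧ PySem.Int.floordiv (-a*x) b ≤ Limit
        then [pvFmt x (PySem.Int.floordiv (-a*x) b)] else []
      else [])) [] ?_) ?_
  · intro acc x _
    dsimp only
    by_cases hmod : PySem.Int.mod (-a*x) b = 0
    · rw [if_pos hmod, if_pos hmod]
      by_cases hr : 0 ≤ PySem.Int.floordiv (-a*x) b ∧ PySem.Int.floordiv (-a*x) b ≤ Limit
      · rw [if_pos hr, if_pos hr]
      · rw [if_neg hr, if_neg hr, List.append_nil]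
    · rw [if_neg hmod, if_neg hmod, List.append_nil]
  · exact Eq.trans (PySem.List.foldl_append_eq_flatMap _ _ _) (List.nil_append _)

-- ===== VERDICT (by name: the statement is the Claim_ definition above) =====
theorem FindintAns_spec : Claim_equal_FindintAns := by
  intro a b Limit _
  unfold Spec_FindintAns
  rw [pv_A_eq]
  by_cases hb : b = 0
  · subst hb
    by_cases ha : a = 0
    · subst ha
      unfold FindintAns_alt
      rw [if_pos rfl, if_pos rfl]
      symm
      refine Eq.trans (PySem.List.foldl_congr_mem _ _
          (fun acc x => acc ++ (PySem.List.pyRange 0 (Limit+1) 1).map (pvFmt x)) [] ?_) ?_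
      · intro acc x _
        exact PySem.List.foldl_append_singleton_eq_map _ _ _
      · refine Eq.trans (Eq.trans (PySem.List.foldl_append_eq_flatMap _ _ _) (List.nil_append _)) ?_
        refine pv_flatMap_congr _ _ _ ?_
        intro x _
        rw [List.filter_eq_self.mpr (by intro y _; simp)]
    · unfold FindintAns_alt
      rw [if_pos rfl, if_neg ha]
      refine List.flatMap_eq_nil_iff.mpr ?_
      intro x hx
      have hx1 := (PySem.List.mem_pyRange_one.mp hx).1
      have hnil : (PySem.List.pyRange 0 (Limit+1) 1).filter (fun y => decide (a*x + 0*y = 0)) = [] := by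
        refine List.filter_eq_nil_iff.mpr ?_
        intro y _
        simp only [decide_eq_true_eq]
        intro h
        have hax : a * x = 0 := by linarith
        rcases mul_eq_zero.mp hax with h1 | h2
        · exact ha h1
        · omega
      rw [hnil]
      rfl
  · rw [pv_B_eq a b Limit hb]
    exact pv_flatMap_congr _ _ _ (fun x _ => pv_inner_eq a b Limit x hb)
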